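-- pv_equiv track=rewrite | github.com/jm9176/Data_structures | Nth_num_in_a_series.py | nth_num
-- ===== SOURCE A (Python) =====
-- def nth_num(n):
--     arr = [14]
--
--     if n < 1:
--         return "Invalid input"
--
--     for i in range(1,n):
--         if i%2 == 1:
--             arr.append(2*(arr[i-1]))
--
--         else:
--             arr.append((6*i) + 8)
--
--     return arr
-- ===== SOURCE B (Python) =====
-- def nth_num(n):
--     if n < 1:
--         return "Invalid input"
--     # closed form per index, no reference to previous elements:
--     # i==0 -> 14 (seed); i==1 -> 2*14 = 28; odd i>=3 -> 2*(6*(i-1)+8) = 12*i+4; even i -> 6*i+8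
--     return [14 if i == 0 else 28 if i == 1 else 12 * i + 4 if i % 2 == 1 else 6 * i + 8
--             for i in range(n)]
-- ===== Notes on version B (the rewrite author's own statement) =====
-- stated objective: alternative
-- what changed: Replaces the sequential recurrence arr.append(2*arr[i-1]) with an independent closed-form term per index (28 at i=1, 12*i+4 for odd i>=3, 6*i+8 for even i) emitted by a single comprehension.
-- outside the precondition, e.g. on nth_num(0): A returns 'Invalid input', B returns 'Invalid input'
import Mathlib
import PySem

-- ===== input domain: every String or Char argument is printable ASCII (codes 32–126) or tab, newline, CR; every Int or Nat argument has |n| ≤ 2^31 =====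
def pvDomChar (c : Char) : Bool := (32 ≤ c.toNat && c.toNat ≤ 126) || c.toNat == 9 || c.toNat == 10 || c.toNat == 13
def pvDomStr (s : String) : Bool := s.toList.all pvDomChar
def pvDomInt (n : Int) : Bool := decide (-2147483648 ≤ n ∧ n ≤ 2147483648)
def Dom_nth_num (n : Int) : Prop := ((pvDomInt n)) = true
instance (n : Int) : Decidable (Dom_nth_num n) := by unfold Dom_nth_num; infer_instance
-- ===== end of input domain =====

-- B replaces A's sequential recurrence by a closed-form term per index (alternative decomposition, same cost).

-- ===== PORT A =====
-- A returns the string "Invalid input" for n < 1 (not a list of ints); those inputs are outside Pre_.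
def nth_num (n : Int) : List Int :=
  if n < 1 then []
  else
    (PySem.List.pyRange 1 n 1).foldl
      (fun arr i =>
        if i % 2 == 1 then arr ++ [2 * PySem.List.pyGetD arr (i - 1) 0]  -- arr[i-1] always in range here
        else arr ++ [6 * i + 8])
      [14]

-- ===== PORT B =====
def nthTerm (i : Int) : Int :=
  if i == 0 then 14 else if i == 1 then 28
  else if i % 2 == 1 then 12 * i + 4 else 6 * i + 8

def nth_num_alt (n : Int) : List Int :=
  if n < 1 then []
  else (PySem.List.pyRange 0 n 1).map nthTerm

-- ===== PRECONDITION & SPEC =====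
-- Pre_ excludes exactly n < 1, where A returns the string "Invalid input" instead of a list of ints.
def Pre_nth_num (n : Int) : Prop := 1 ≤ n
instance (n : Int) : Decidable (Pre_nth_num n) := by unfold Pre_nth_num; infer_instance
def pvWitness_nth_num : Int := (5)

def Spec_nth_num (n : Int) (out : List Int) : Prop := out = nth_num_alt n
instance (n : Int) (out : List Int) : Decidable (Spec_nth_num n out) := by unfold Spec_nth_num; infer_instance

-- ===== CLAIM (what is proved, stated in full; the proofs are below) =====
def Claim_equal_nth_num : Prop := ∀ (n : Int), Dom_nth_num n → Pre_nth_num n → Spec_nth_num n (nth_num n)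

-- ===== LEMMAS AND PROOFS =====

theorem nth_num_loop (k : Nat) :
    (PySem.List.pyRange 1 (1 + (k : Int)) 1).foldl
      (fun arr i =>
        if i % 2 == 1 then arr ++ [2 * PySem.List.pyGetD arr (i - 1) 0]
        else arr ++ [6 * i + 8])
      [14]
    = (PySem.List.pyRange 0 (1 + (k : Int)) 1).map nthTerm := by
  induction k with
  | zero =>
      decide
  | succ k ih =>
      have h1 : (1 : Int) ≤ 1 + (k : Int) := by omega
      have h0 : (0 : Int) ≤ 1 + (k : Int) := by omega
      have e1 : (1 + ((k + 1 : Nat) : Int)) = (1 + (k : Int)) + 1 := by push_cast; ring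
      rw [e1, PySem.List.pyRange_one_succ_right h1, PySem.List.pyRange_one_succ_right h0,
          List.foldl_append, ih, List.map_append]
      simp only [List.foldl]
      have hget : PySem.List.pyGetD ((PySem.List.pyRange 0 (1 + (k : Int)) 1).map nthTerm)
          ((1 + (k : Int)) - 1) 0 = nthTerm k := by
        have : ((1 + (k : Int)) - 1) = ((k : Nat) : Int) := by omega
        rw [this]
        have := PySem.List.pyGetD_map_pyRange nthTerm (k + 1) k 0 (by omega)
        simpa using this
      by_cases hodd : (1 + (k : Int)) % 2 = 1
      · rw [if_pos (by simpa using hodd), hget]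
        congr 1
        have hk : (k : Int) % 2 = 0 := by omega
        by_cases hk0 : k = 0
        · subst hk0; simp [nthTerm]
        · have hkne : (k : Int) ≠ 0 := by exact_mod_cast Int.natCast_ne_zero.mpr hk0
          have hkne1 : (k : Int) ≠ 1 := by omega
          have h1k : (1 + (k : Int)) ≠ 0 := by omega
          have h1k1 : (1 + (k : Int)) ≠ 1 := by omega
          simp [nthTerm, hkne1, hk, h1k, h1k1, hodd, hk0]
          omega
      · rw [if_neg (by simpa using hodd)]
        congr 1
        have h1k : (1 + (k : Int)) ≠ 0 := by omega
        have h1k1 : (1 + (k : Int)) ≠ 1 := by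
          intro h; apply hodd; omega
        have hmod : (1 + (k : Int)) % 2 ≠ 1 := hodd
        simp [nthTerm, h1k, h1k1, hmod]

-- ===== VERDICT (by name: the statement is the Claim_ definition above) =====
theorem nth_num_spec : Claim_equal_nth_num := by
  intro n _ hpre
  unfold Spec_nth_num nth_num nth_num_alt
  have hn : ¬ n < 1 := by exact not_lt.mpr hpre
  rw [if_neg hn, if_neg hn]
  obtain ⟨k, hk⟩ : ∃ k : Nat, n = 1 + (k : Int) := ⟨(n - 1).toNat, by omega⟩
  subst hk
  exact nth_num_loop k
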